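-- pv_equiv track=rewrite | github.com/NKcell/LeetCode | 914. X of a Kind in a Deck of Cards/914.py | hasGroupsSizeX1
-- ===== SOURCE A (Python) =====
-- def hasGroupsSizeX1(deck):
--     import collections
--     from functools import reduce
--     def gcd(a, b):
--         while b: a, b = b, a % b
--         return a
--     count = collections.Counter(deck).values()
--     return reduce(gcd, count) > 1
-- ===== SOURCE B (Python) =====
-- def hasGroupsSizeX1(deck):
--     import collections
--     count = collections.Counter(deck).values()
--     m = min(count)
--     for X in range(2, m + 1):
--         if all(c % X == 0 for c in count):
--             return True
--     return False
-- ===== Notes on version B (the rewrite author's own statement) =====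
-- stated objective: alternative
-- what changed: B replaces the reduce-with-gcd over the multiplicities by a direct search for a group size X in range(2, min(count)+1) that divides every multiplicity.
import Mathlib
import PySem

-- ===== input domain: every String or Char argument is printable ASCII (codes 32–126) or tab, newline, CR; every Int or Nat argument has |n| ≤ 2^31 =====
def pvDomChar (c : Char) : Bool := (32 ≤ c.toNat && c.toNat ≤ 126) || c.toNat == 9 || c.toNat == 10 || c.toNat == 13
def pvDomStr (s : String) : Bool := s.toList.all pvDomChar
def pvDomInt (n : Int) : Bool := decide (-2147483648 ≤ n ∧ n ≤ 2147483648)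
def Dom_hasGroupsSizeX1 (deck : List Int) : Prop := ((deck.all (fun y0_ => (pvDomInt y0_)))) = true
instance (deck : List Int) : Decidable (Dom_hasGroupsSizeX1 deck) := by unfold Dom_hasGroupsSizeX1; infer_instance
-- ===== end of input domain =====

-- B searches directly for a group size X in 2..min(count) dividing every multiplicity,
-- instead of A's reduce-with-gcd over the multiplicities (objective: alternative).

-- ===== PORT A =====
-- while b: a, b = b, a % b; return a
def pyGcdLoop (a b : Int) : Int :=
  if h : b = 0 then a else pyGcdLoop b (PySem.Int.mod a b)
termination_by b.natAbs
decreasing_by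
  rcases lt_or_gt_of_ne h with hb | hb
  · have := PySem.Int.mod_neg_bounds a hb; omega
  · have h1 := PySem.Int.mod_nonneg a hb
    have h2 := PySem.Int.mod_lt a hb
    omega

def hasGroupsSizeX1 (deck : List Int) : Bool :=
  let count := (PySem.Dict.counter deck).values
  match count with
  | [] => false   -- reduce over an empty iterable raises TypeError; excluded by Pre_
  | c :: rest => decide (rest.foldl pyGcdLoop c > 1)

-- ===== PORT B =====
def hasGroupsSizeX1_alt (deck : List Int) : Bool :=
  let count := (PySem.Dict.counter deck).values
  match PySem.List.min? count (fun c => c) with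
  | none => false  -- min() of an empty iterable raises ValueError; excluded by Pre_
  | some m =>
      (PySem.List.pyRange 2 (m + 1) 1).any
        (fun X => count.all (fun c => PySem.Int.mod c X == 0))

-- ===== PRECONDITION & SPEC =====
-- Pre_ excludes only the empty deck, on which A raises TypeError (reduce of an empty iterable)
-- and B raises ValueError (min of an empty iterable).
def Pre_hasGroupsSizeX1 (deck : List Int) : Prop := deck ≠ []
instance (deck : List Int) : Decidable (Pre_hasGroupsSizeX1 deck) := by unfold Pre_hasGroupsSizeX1; infer_instance
def pvWitness_hasGroupsSizeX1 : List Int := [1, 2, 2, 1]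

def Spec_hasGroupsSizeX1 (deck : List Int) (out : Bool) : Prop := out = hasGroupsSizeX1_alt deck
instance (deck : List Int) (out : Bool) : Decidable (Spec_hasGroupsSizeX1 deck out) := by unfold Spec_hasGroupsSizeX1; infer_instance

-- ===== CLAIM (what is proved, stated in full; the proofs are below) =====
def Claim_equal_hasGroupsSizeX1 : Prop := ∀ (deck : List Int), Dom_hasGroupsSizeX1 deck → Pre_hasGroupsSizeX1 deck → Spec_hasGroupsSizeX1 deck (hasGroupsSizeX1 deck)

-- ===== LEMMAS AND PROOFS =====

-- Python's gcd loop equals Int.gcd on nonnegative inputs.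
theorem pyGcdLoop_eq_gcd (a b : Int) (ha : 0 ≤ a) (hb : 0 ≤ b) :
    pyGcdLoop a b = (Int.gcd a b : Int) := by
  by_cases h : b = 0
  · subst h
    rw [pyGcdLoop]
    simp [Int.gcd, Int.natAbs_of_nonneg ha]
  · have hbpos : 0 < b := lt_of_le_of_ne hb (Ne.symm h)
    rw [pyGcdLoop]
    simp only [h, dite_false]
    rw [PySem.Int.mod_eq_emod_of_pos hbpos]
    have hm : 0 ≤ a % b := Int.emod_nonneg a h
    have := pyGcdLoop_eq_gcd b (a % b) hb hm
    rw [this]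
    congr 1
    -- Int.gcd b (a % b) = Int.gcd a b
    show Nat.gcd b.natAbs (a % b).natAbs = Nat.gcd a.natAbs b.natAbs
    have key : a % b = ((a.toNat % b.toNat : Nat) : Int) := by
      push_cast [Int.toNat_of_nonneg ha, Int.toNat_of_nonneg hb]
      rfl
    have habs : (a % b).natAbs = a.natAbs % b.natAbs := by
      calc (a % b).natAbs = (a % b).toNat := by omega
        _ = a.toNat % b.toNat := by rw [key]; exact Int.toNat_natCast _
        _ = a.natAbs % b.natAbs := by congr 1 <;> omega
    rw [Nat.gcd_comm b.natAbs (a % b).natAbs, habs, ← Nat.gcd_rec b.natAbs a.natAbs]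
    exact Nat.gcd_comm _ _
termination_by b.natAbs
decreasing_by
  have h2 : a % b < b := Int.emod_lt_of_pos a (by omega)
  omega

def igcd (x y : Int) : Int := (Int.gcd x y : Int)

theorem foldl_pyGcd_eq (rest : List Int) (c : Int) (hc : 0 ≤ c)
    (hr : ∀ x ∈ rest, 0 ≤ x) :
    rest.foldl pyGcdLoop c = rest.foldl igcd c := by
  induction rest generalizing c with
  | nil => rfl
  | cons y t ih =>
    simp only [List.foldl_cons]
    rw [pyGcdLoop_eq_gcd c y hc (hr y (by simp))]
    exact ih (Int.gcd c y) (Int.natCast_nonneg _) (fun x hx => hr x (by simp [hx]))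

theorem foldl_igcd_nonneg (rest : List Int) (c : Int) (hc : 0 ≤ c) :
    0 ≤ rest.foldl igcd c := by
  induction rest generalizing c with
  | nil => exact hc
  | cons y t ih => exact ih _ (Int.natCast_nonneg _)

theorem foldl_igcd_dvd (rest : List Int) (c : Int) :
    rest.foldl igcd c ∣ c ∧ ∀ x ∈ rest, rest.foldl igcd c ∣ x := by
  induction rest generalizing c with
  | nil => exact ⟨dvd_refl c, by simp⟩
  | cons y t ih =>
    simp only [List.foldl_cons]
    obtain ⟨h1, h2⟩ := ih (igcd c y)
    refine ⟨h1.trans (show igcd c y ∣ c from by simp only [igcd]; exact Int.gcd_dvd_left c y), ?_⟩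
    intro x hx
    rcases List.mem_cons.mp hx with rfl | hx
    · exact h1.trans (show igcd c x ∣ x from by simp only [igcd]; exact Int.gcd_dvd_right c x)
    · exact h2 x hx

theorem dvd_foldl_igcd (rest : List Int) (c d : Int) (h1 : d ∣ c)
    (h2 : ∀ x ∈ rest, d ∣ x) : d ∣ rest.foldl igcd c := by
  induction rest generalizing c with
  | nil => exact h1
  | cons y t ih =>
    refine ih _ ?_ (fun x hx => h2 x (by simp [hx]))
    show d ∣ igcd c y
    simp only [igcd]
    exact Int.dvd_coe_gcd h1 (h2 y (by simp))

theorem counter_values_pos (deck : List Int) :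
    ∀ x ∈ (PySem.Dict.counter deck).values, 1 ≤ x := by
  intro x hx
  simp only [PySem.Dict.values, PySem.Dict.items_counter, List.map_map] at hx
  obtain ⟨k, hk, rfl⟩ := List.mem_map.mp hx
  have : k ∈ deck := (PySem.Set.mem_ofList _ _).mp hk
  have : 1 ≤ deck.count k := List.one_le_count_iff.mpr this
  simp only [Function.comp_apply]
  exact_mod_cast this

theorem counter_values_ne_nil (deck : List Int) (h : deck ≠ []) :
    (PySem.Dict.counter deck).values ≠ [] := by
  intro hv
  cases deck with
  | nil => exact h rfl
  | cons a t =>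
    have ha : a ∈ PySem.Set.ofList (a :: t) := (PySem.Set.mem_ofList _ _).mpr (by simp)
    have : ((a : Int), ((a :: t).count a : Int)) ∈ (PySem.Dict.counter (a :: t)).items := by
      rw [PySem.Dict.items_counter]
      exact List.mem_map.mpr ⟨a, ha, rfl⟩
    have : ((a :: t).count a : Int) ∈ (PySem.Dict.counter (a :: t)).values :=
      List.mem_map.mpr ⟨_, this, rfl⟩
    rw [hv] at this
    exact List.not_mem_nil this

-- ===== VERDICT (by name: the statement is the Claim_ definition above) =====
theorem hasGroupsSizeX1_spec : Claim_equal_hasGroupsSizeX1 := by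
  intro deck _ hpre
  have hne := counter_values_ne_nil deck hpre
  have hpos := counter_values_pos deck
  cases hc : (PySem.Dict.counter deck).values with
  | nil => exact absurd hc hne
  | cons c rest =>
    have hposc : ∀ x ∈ c :: rest, 1 ≤ x := by rw [← hc]; exact hpos
    have hc1 : 1 ≤ c := hposc c (by simp)
    -- min? is some
    obtain ⟨m, hm⟩ : ∃ m, PySem.List.min? (c :: rest) (fun c => c) = some m := by
      cases hmm : PySem.List.min? (c :: rest) (fun c => c) with
      | none => exact absurd (((PySem.List.min?_eq_none_iff _ _).mp hmm)) (by simp)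
      | some m => exact ⟨m, rfl⟩
    have hmmem : m ∈ c :: rest := PySem.List.min?_mem hm
    have hmin : ∀ y ∈ c :: rest, m ≤ y := PySem.List.min?_isMin hm
    have hm1 : 1 ≤ m := hposc m hmmem
    unfold Spec_hasGroupsSizeX1 hasGroupsSizeX1 hasGroupsSizeX1_alt
    simp only [hc, hm]
    -- the gcd value
    rw [foldl_pyGcd_eq rest c (by omega) (fun x hx => by have := hposc x (by simp [hx]); omega)]
    set g := rest.foldl igcd c with hg
    have hgnn : 0 ≤ g := foldl_igcd_nonneg rest c (by omega)
    obtain ⟨hgc, hgr⟩ := foldl_igcd_dvd rest c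
    have hgdvd : ∀ x ∈ c :: rest, g ∣ x := by
      intro x hx
      rcases List.mem_cons.mp hx with rfl | hx
      · exact hgc
      · exact hgr x hx
    have hgpos : 0 < g := by
      rcases lt_or_eq_of_le hgnn with h | h
      · exact h
      · exfalso
        have h0 := hgdvd c (by simp)
        rw [← h] at h0
        have := Int.zero_dvd.mp h0
        omega
    rcases Decidable.em (1 < g) with hbig | hsmall
    · -- A returns true; B's search finds X = g
      have hgle : g ≤ m := Int.le_of_dvd (by omega) (hgdvd m hmmem)
      rw [decide_eq_true hbig]
      symm
      rw [List.any_eq_true]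
      refine ⟨g, PySem.List.mem_pyRange_one.mpr ⟨by omega, by omega⟩, ?_⟩
      rw [List.all_eq_true]
      intro x hx
      simpa [PySem.Int.mod_eq_zero_iff_dvd] using hgdvd x hx
    · -- A returns false; no X can divide everything
      rw [decide_eq_false hsmall]
      symm
      rw [List.any_eq_false]
      intro X hX hall
      have hX2 : 2 ≤ X := (PySem.List.mem_pyRange_one.mp hX).1
      rw [List.all_eq_true] at hall
      have hXdvd : ∀ x ∈ c :: rest, X ∣ x := by
        intro x hx
        simpa [PySem.Int.mod_eq_zero_iff_dvd] using hall x hx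
      have hXg : X ∣ g := dvd_foldl_igcd rest c X (hXdvd c (by simp))
        (fun x hx => hXdvd x (by simp [hx]))
      have := Int.le_of_dvd hgpos hXg
      omega
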